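-- pv_equiv track=rewrite | github.com/sirzzang/coding-practice | BOJ/구현/BOJ8958_OX퀴즈.py | solution
-- ===== SOURCE A (Python) =====
-- def solution(answer_str):
--     score = 0
--     cur = 0
--     for i in range(len(answer_str)):
--         if answer_str[i] == "O":
--             cur += 1
--             score += cur
--         else:
--             cur = 0
--     return score
-- ===== SOURCE B (Python) =====
-- def solution(answer_str):
--     total = 0
--     i = 0
--     n = len(answer_str)
--     while i < n:
--         if answer_str[i] == 'O':
--             j = i
--             while j < n and answer_str[j] == 'O':
--                 j += 1
--             L = j - i
--             total += L * (L + 1) // 2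
--             i = j
--         else:
--             i += 1
--     return total
-- ===== Notes on version B (the rewrite author's own statement) =====
-- stated objective: alternative
-- what changed: Replaces the char-by-char running-streak counter with a run scan: each maximal run of 'O' is located and its contribution added in closed form as the triangular number L*(L+1)//2.
import Mathlib
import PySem

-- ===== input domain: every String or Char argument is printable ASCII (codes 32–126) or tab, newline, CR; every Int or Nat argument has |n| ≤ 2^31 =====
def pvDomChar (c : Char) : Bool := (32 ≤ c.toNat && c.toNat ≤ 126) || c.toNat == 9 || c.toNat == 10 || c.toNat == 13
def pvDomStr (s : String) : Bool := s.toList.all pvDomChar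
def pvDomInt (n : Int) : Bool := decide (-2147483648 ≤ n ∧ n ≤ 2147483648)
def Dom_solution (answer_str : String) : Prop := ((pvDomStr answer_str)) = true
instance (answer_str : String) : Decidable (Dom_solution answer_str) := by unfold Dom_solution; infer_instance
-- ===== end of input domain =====

-- B replaces A's char-by-char running counter with a maximal-run scan using the
-- closed-form triangular number per run; same O(n) cost (objective: alternative).

-- ===== PORT A =====
-- A's for-loop over the characters with state (score, cur), as a fold.
def solution (answer_str : String) : Int :=
  (answer_str.toList.foldl
    (fun (sc : Int × Int) c =>
      if c = 'O' then (sc.1 + (sc.2 + 1), sc.2 + 1) else (sc.1, 0))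
    (0, 0)).1

-- ===== PORT B =====
-- Source B's outer while loop: at an 'O', the inner while advances past the maximal
-- run (takeWhile/dropWhile), its length L contributes L*(L+1)//2 (nonneg, so
-- Nat division = Python //); otherwise step one char.
def solGoB : List Char → Int
  | [] => 0
  | c :: cs =>
    if c = 'O' then
      let L : Nat := (cs.takeWhile (fun x => x = 'O')).length + 1
      ((L * (L + 1) / 2 : Nat) : Int) + solGoB (cs.dropWhile (fun x => x = 'O'))
    else solGoB cs
termination_by l => l.length
decreasing_by
  · exact Nat.lt_succ_of_le (List.length_dropWhile_le _ _)
  · exact Nat.lt_succ_self _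

def solution_alt (answer_str : String) : Int := solGoB answer_str.toList

-- ===== PRECONDITION & SPEC =====
def Spec_solution (answer_str : String) (out : Int) : Prop := out = solution_alt answer_str
instance (answer_str : String) (out : Int) : Decidable (Spec_solution answer_str out) := by unfold Spec_solution; infer_instance

-- ===== CLAIM (what is proved, stated in full; the proofs are below) =====
def Claim_equal_solution : Prop := ∀ (answer_str : String), Dom_solution answer_str → Spec_solution answer_str (solution answer_str)

-- ===== LEMMAS AND PROOFS =====

def triPV (n : Nat) : Nat := n * (n + 1) / 2

theorem triPV_succ (n : Nat) : triPV (n + 1) = triPV n + (n + 1) := by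
  unfold triPV
  have h1 : (n + 1) * (n + 1 + 1) = n * (n + 1) + 2 * (n + 1) := by ring
  have h2 : n * (n + 1) % 2 = 0 := Nat.even_iff.mp (Nat.even_mul_succ_self n)
  omega

-- the remaining score contributed by the rest of the string given current streak cur
def bonusPV : Int → List Char → Int
  | _, [] => 0
  | cur, c :: cs => if c = 'O' then (cur + 1) + bonusPV (cur + 1) cs else bonusPV 0 cs

theorem foldA_eq_bonus (l : List Char) (score cur : Int) :
    (l.foldl (fun (sc : Int × Int) c =>
        if c = 'O' then (sc.1 + (sc.2 + 1), sc.2 + 1) else (sc.1, 0)) (score, cur)).1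
      = score + bonusPV cur l := by
  induction l generalizing score cur with
  | nil => simp [bonusPV]
  | cons c cs ih =>
    by_cases h : c = 'O' <;> simp [bonusPV, h, ih, add_assoc]

theorem bonus_run (l : List Char) (cur : Nat) :
    bonusPV (cur : Int) l
      = (triPV (cur + (l.takeWhile (fun x => x = 'O')).length) : Int) - (triPV cur : Int)
        + bonusPV 0 (l.dropWhile (fun x => x = 'O')) := by
  induction l generalizing cur with
  | nil => simp [bonusPV]
  | cons c cs ih =>
    by_cases h : c = 'O'
    · have hc : bonusPV (cur : Int) (c :: cs) = ((cur : Int) + 1) + bonusPV ((cur : Int) + 1) cs := by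
        simp [bonusPV, h]
      have ih' := ih (cur + 1)
      simp only [List.takeWhile_cons, List.dropWhile_cons, h, decide_true] at *
      rw [hc]
      push_cast at ih' ⊢
      rw [ih']
      have ht : triPV (cur + 1) = triPV cur + (cur + 1) := triPV_succ cur
      have harr : cur + 1 + (cs.takeWhile (fun x => x = 'O')).length
          = cur + ((cs.takeWhile (fun x => x = 'O')).length + 1) := by omega
      rw [harr, ht]
      have hl : (('O' :: List.takeWhile (fun x => decide (x = 'O')) cs).length)
          = (List.takeWhile (fun x => decide (x = 'O')) cs).length + 1 := by simp
      rw [hl]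
      push_cast
      ring
    · simp [bonusPV, h]

theorem bonus_eq_solGoB_aux (n : Nat) :
    ∀ l : List Char, l.length ≤ n → bonusPV 0 l = solGoB l := by
  induction n with
  | zero =>
    intro l hl
    have : l = [] := List.eq_nil_of_length_eq_zero (Nat.le_zero.mp hl)
    subst this; simp [bonusPV, solGoB]
  | succ n ih =>
    intro l hl
    match l with
    | [] => simp [bonusPV, solGoB]
    | c :: cs =>
      by_cases h : c = 'O'
      · subst h
        have h0 : bonusPV (0 : Int) ('O' :: cs) = ((0 : Int) + 1) + bonusPV ((0 : Int) + 1) cs := by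
          simp [bonusPV]
        have hr := bonus_run cs 1
        have ihd : bonusPV 0 (cs.dropWhile (fun x => x = 'O')) = solGoB (cs.dropWhile (fun x => x = 'O')) := by
          apply ih
          have := List.length_dropWhile_le (fun x => decide (x = 'O')) cs
          simp at hl; omega
        rw [h0]
        push_cast at hr
        norm_num at hr ⊢
        rw [hr, ihd]
        rw [solGoB, if_pos rfl]
        have hk : triPV (1 + (cs.takeWhile (fun x => x = 'O')).length)
            = triPV ((cs.takeWhile (fun x => x = 'O')).length + 1) := by
          congr 1; omega
        rw [hk]
        simp only [triPV]
        push_cast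
        ring
      · rw [solGoB, if_neg h]
        have ihc : bonusPV 0 cs = solGoB cs := by
          apply ih; simp at hl; omega
        rw [← ihc]
        simp [bonusPV, h]

theorem bonus_eq_solGoB (l : List Char) : bonusPV 0 l = solGoB l :=
  bonus_eq_solGoB_aux l.length l le_rfl

-- ===== VERDICT (by name: the statement is the Claim_ definition above) =====
theorem solution_spec : Claim_equal_solution := by
  intro s _
  unfold Spec_solution solution solution_alt
  rw [foldA_eq_bonus, bonus_eq_solGoB]
  ring
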